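-- pv_equiv track=rewrite | github.com/tachyon-beep/esper-lite | src/esper/kasmina/blueprints/cnn.py | get_num_groups
-- ===== SOURCE A (Python) =====
-- def get_num_groups(channels: int, target_group_size: int = 16) -> int:
--     """Select optimal num_groups for GroupNorm.
--
--     Prefers 32 groups, falls back to smaller counts if channels isn't divisible.
--     Targets at least `target_group_size` channels per group for statistical stability.
--     """
--     for num_groups in [32, 16, 8, 4, 2, 1]:
--         if channels % num_groups == 0 and channels // num_groups >= target_group_size:
--             return num_groups
--     # Fallback: just find a divisor
--     for num_groups in [32, 16, 8, 4, 2, 1]: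
--         if channels % num_groups == 0:
--             return num_groups
--     return 1
-- ===== SOURCE B (Python) =====
-- def get_num_groups(channels: int, target_group_size: int = 16) -> int:
--     """Single halving pass: ng = 32, 16, ..., 1, keeping the first divisor as fallback."""
--     best = 0
--     ng = 32
--     while ng >= 1:
--         if channels % ng == 0:
--             if channels // ng >= target_group_size:
--                 return ng
--             if best == 0:
--                 best = ng
--         ng //= 2
--     return best if best else 1
-- ===== Notes on version B (the rewrite author's own statement) =====
-- stated objective: simpler
-- what changed: Replaces the two scans over the literal list [32,16,8,4,2,1] by one halving while-loop (ng //= 2 from 32) that returns the fit immediately and keeps the first divisor in an accumulator as fallback.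
import Mathlib
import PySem

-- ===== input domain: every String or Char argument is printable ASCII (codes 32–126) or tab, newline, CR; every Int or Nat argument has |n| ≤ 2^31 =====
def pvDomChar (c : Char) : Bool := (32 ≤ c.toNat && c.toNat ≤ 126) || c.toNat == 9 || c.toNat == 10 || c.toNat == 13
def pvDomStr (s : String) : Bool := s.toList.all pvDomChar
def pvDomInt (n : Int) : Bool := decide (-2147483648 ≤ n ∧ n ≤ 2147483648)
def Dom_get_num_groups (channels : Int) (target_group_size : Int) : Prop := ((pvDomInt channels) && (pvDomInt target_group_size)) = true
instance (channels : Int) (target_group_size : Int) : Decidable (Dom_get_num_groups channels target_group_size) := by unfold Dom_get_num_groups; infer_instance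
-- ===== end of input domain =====

-- B replaces A's two scans over [32,16,8,4,2,1] by one halving loop with a fallback accumulator (objective: simpler).

-- ===== PORT A =====
-- first loop of A: first ng with channels % ng == 0 and channels // ng >= target
def pvLoop1 : List Int → Int → Int → Option Int
  | [], _, _ => none
  | ng :: rest, c, t =>
      if PySem.Int.mod c ng = 0 ∧ PySem.Int.floordiv c ng ≥ t then some ng
      else pvLoop1 rest c t

-- second loop of A: first ng with channels % ng == 0
def pvLoop2 : List Int → Int → Option Int
  | [], _ => none
  | ng :: rest, c => if PySem.Int.mod c ng = 0 then some ng else pvLoop2 rest c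

def get_num_groups (channels : Int) (target_group_size : Int) : Int :=
  match pvLoop1 [32, 16, 8, 4, 2, 1] channels target_group_size with
  | some ng => ng
  | none =>
    match pvLoop2 [32, 16, 8, 4, 2, 1] channels with
    | some ng => ng
    | none => 1

-- ===== PORT B =====
-- B's while loop: ng halves from 32; best is the first divisor seen (0 = unset)
def pvAltLoop (ng : Nat) (c t best : Int) : Int :=
  if 1 ≤ ng then
    if PySem.Int.mod c (ng : Int) = 0 then
      if PySem.Int.floordiv c (ng : Int) ≥ t then (ng : Int)
      else pvAltLoop (ng / 2) c t (if best = 0 then (ng : Int) else best)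
    else pvAltLoop (ng / 2) c t best
  else if best ≠ 0 then best else 1
termination_by ng
decreasing_by all_goals exact Nat.div_lt_self (by omega) (by omega)

def get_num_groups_alt (channels : Int) (target_group_size : Int) : Int :=
  pvAltLoop 32 channels target_group_size 0

-- ===== PRECONDITION & SPEC =====
def Spec_get_num_groups (channels : Int) (target_group_size : Int) (out : Int) : Prop := out = get_num_groups_alt channels target_group_size
instance (channels : Int) (target_group_size : Int) (out : Int) : Decidable (Spec_get_num_groups channels target_group_size out) := by unfold Spec_get_num_groups; infer_instance

-- ===== CLAIM (what is proved, stated in full; the proofs are below) =====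
def Claim_equal_get_num_groups : Prop := ∀ (channels : Int) (target_group_size : Int), Dom_get_num_groups channels target_group_size → Spec_get_num_groups channels target_group_size (get_num_groups channels target_group_size)

-- ===== LEMMAS AND PROOFS =====

-- the halving sequence ng, ng/2, ..., 1 that B's while loop visits
def pvGeom (ng : Nat) : List Int :=
  if h : 1 ≤ ng then ((ng : Nat) : Int) :: pvGeom (ng / 2) else []
termination_by ng
decreasing_by exact Nat.div_lt_self (by omega) (by omega)

theorem pvAltLoop_eq (ng : Nat) (c t best : Int) :
    pvAltLoop ng c t best =
      (match pvLoop1 (pvGeom ng) c t with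
       | some g => g
       | none => if best ≠ 0 then best
                 else (match pvLoop2 (pvGeom ng) c with | some g => g | none => 1)) := by
  induction ng using Nat.strong_induction_on generalizing best with
  | _ ng ih =>
    rw [pvAltLoop, pvGeom]
    by_cases h1 : 1 ≤ ng
    · rw [if_pos h1, dif_pos h1]
      simp only [pvLoop1, pvLoop2]
      have hng : ((ng : Nat) : Int) ≠ 0 := by exact_mod_cast (by omega : ng ≠ 0)
      by_cases hm : PySem.Int.mod c (ng : Int) = 0
      · by_cases hd : PySem.Int.floordiv c (ng : Int) ≥ t
        · simp [hm, hd]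
        · have key := ih (ng / 2) (Nat.div_lt_self (by omega) (by omega))
            (if best = 0 then ((ng : Nat) : Int) else best)
          rw [key]
          have hne : ng ≠ 0 := by omega
          by_cases hb : best = 0 <;> simp [hb, hm, hd, hne]
      · have key := ih (ng / 2) (Nat.div_lt_self (by omega) (by omega)) best
        rw [key]
        simp [hm]
    · rw [if_neg h1, dif_neg h1]
      simp [pvLoop1, pvLoop2]

theorem pvGeom_32 : pvGeom 32 = [32, 16, 8, 4, 2, 1] := by
  rw [pvGeom, pvGeom, pvGeom, pvGeom, pvGeom, pvGeom, pvGeom]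
  norm_num

-- ===== VERDICT (by name: the statement is the Claim_ definition above) =====
theorem get_num_groups_spec : Claim_equal_get_num_groups := by
  intro c t _
  unfold Spec_get_num_groups get_num_groups get_num_groups_alt
  rw [pvAltLoop_eq, pvGeom_32]
  simp
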